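-- pv_equiv track=rewrite | github.com/avinashvarna/sanskrit_tts | sanskrit_tts/util.py | adapt_visargas
-- ===== SOURCE A (Python) =====
-- def adapt_visargas(text: str) -> str:
--     """Replace visargas with the corresponding variant of h based on common pronunciation patterns
--
--     Parameters
--     ----------
--     text : str
--         input text
--
--     Returns
--     -------
--     str
--         text with visargas adapted for pronunciation
--     """
--     replacements = [
--         ("aH", "aha"),
--         ("AH", "Aha"),
--         ("iH", "ihi"),
--         ("IH", "Ihi"),
--         ("uH", "uhu"),
--         ("UH", "Uhu"),
--         ("FH", "Fhi"),
--         ("eH", "ehe"),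
--         ("EH", "ehi"),
--         ("oH", "oho"),
--         ("OH", "Ohu"),
--     ]
--     for old, new in replacements:
--         text = text.replace(old, new)
--     return text
-- ===== SOURCE B (Python) =====
-- def adapt_visargas(text: str) -> str:
--     """Single left-to-right pass: when an 'H' follows a mapped vowel, the
--     just-emitted vowel is replaced by its full pronunciation variant."""
--     table = {
--         "a": "aha", "A": "Aha", "i": "ihi", "I": "Ihi", "u": "uhu",
--         "U": "Uhu", "F": "Fhi", "e": "ehe", "E": "ehi", "o": "oho", "O": "Ohu",
--     }
--     out = []
--     prev = None
--     for ch in text: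
--         if ch == "H" and prev in table:
--             out[-1] = table[prev]
--         else:
--             out.append(ch)
--         prev = ch
--     return "".join(out)
-- ===== Notes on version B (the rewrite author's own statement) =====
-- stated objective: alternative
-- what changed: Replaces A's 11 sequential whole-string str.replace passes by one left-to-right scan with a vowel-to-replacement dict that rewrites the just-emitted vowel when an 'H' follows (safe because no replacement contains 'H' and none ends in a later pattern's vowel).
import Mathlib
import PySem

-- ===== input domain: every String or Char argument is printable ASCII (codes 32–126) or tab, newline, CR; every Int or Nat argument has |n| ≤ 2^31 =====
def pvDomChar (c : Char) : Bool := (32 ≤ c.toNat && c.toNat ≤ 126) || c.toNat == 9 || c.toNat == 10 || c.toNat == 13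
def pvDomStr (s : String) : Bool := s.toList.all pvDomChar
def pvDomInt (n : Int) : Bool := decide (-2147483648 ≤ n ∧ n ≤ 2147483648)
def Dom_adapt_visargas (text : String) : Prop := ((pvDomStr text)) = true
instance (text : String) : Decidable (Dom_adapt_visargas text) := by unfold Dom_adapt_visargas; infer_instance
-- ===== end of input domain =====

-- B replaces A's 11 sequential str.replace passes by a single left-to-right scan with a
-- vowel→replacement table rewriting the just-emitted vowel when an 'H' follows (objective: alternative).


-- ===== PORT A =====
def adapt_visargas (text : String) : String :=
  let replacements : List (String × String) :=
    [("aH", "aha"), ("AH", "Aha"), ("iH", "ihi"), ("IH", "Ihi"), ("uH", "uhu"),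
     ("UH", "Uhu"), ("FH", "Fhi"), ("eH", "ehe"), ("EH", "ehi"), ("oH", "oho"),
     ("OH", "Ohu")]
  replacements.foldl (fun t p => PySem.Str.replace t p.1 p.2) text

-- ===== PORT B =====
-- Source B's dict: keys are the one-character vowel strings, modelled as Char
def pvTable : List (Char × List Char) :=
  [('a', ['a','h','a']), ('A', ['A','h','a']), ('i', ['i','h','i']),
   ('I', ['I','h','i']), ('u', ['u','h','u']), ('U', ['U','h','u']),
   ('F', ['F','h','i']), ('e', ['e','h','e']), ('E', ['e','h','i']),
   ('o', ['o','h','o']), ('O', ['O','h','u'])]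

-- one step of Source B's loop: state = (out chunks, previous original char)
def pvStepB (s : List (List Char) × Option Char) (ch : Char) :
    List (List Char) × Option Char :=
  match s.2 with
  | some p =>
    match pvTable.lookup p with
    | some r => if ch = 'H' then (s.1.dropLast ++ [r], some ch)
                else (s.1 ++ [[ch]], some ch)
    | none => (s.1 ++ [[ch]], some ch)
  | none => (s.1 ++ [[ch]], some ch)

def adapt_visargas_alt (text : String) : String :=
  String.ofList ((text.toList.foldl pvStepB ([], none)).1.flatten)

-- ===== PRECONDITION & SPEC =====
def Spec_adapt_visargas (text : String) (out : String) : Prop := out = adapt_visargas_alt text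
instance (text : String) (out : String) : Decidable (Spec_adapt_visargas text out) := by unfold Spec_adapt_visargas; infer_instance

-- ===== CLAIM (what is proved, stated in full; the proofs are below) =====
def Claim_equal_adapt_visargas : Prop := ∀ (text : String), Dom_adapt_visargas text → Spec_adapt_visargas text (adapt_visargas text)

-- ===== LEMMAS AND PROOFS =====

-- plain structural characterisation of one str.replace pass (old nonempty)
-- (proof-only definitions: the common recursive specification both ports compute)
def pvRepG (ps : List (Char × List Char)) : List Char → List Char
  | [] => []
  | [c] => [c]
  | c :: d :: rest =>
    if d = 'H' then
      match ps.lookup c with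
      | some r => r ++ pvRepG ps rest
      | none => c :: pvRepG ps (d :: rest)
    else c :: pvRepG ps (d :: rest)
  termination_by l => l.length

def pvChain (ps : List (Char × List Char)) (l : List Char) : List Char :=
  ps.foldl (fun t p => PySem.Chars.replace t (p.1 :: ['H']) p.2) l

def pvGoodRepl (ps : List (Char × List Char)) : Prop :=
  ∀ p ∈ ps, p.1 ≠ 'H' ∧ p.2 ≠ [] ∧ 'H' ∉ p.2

def pvCross (ps : List (Char × List Char)) : Prop :=
  ps.Pairwise (fun a b => b.1 ≠ a.1 ∧ a.2.getLast? ≠ some b.1)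


def pvRep1 (old new : List Char) : List Char → List Char
  | [] => []
  | c :: t =>
    if old.isPrefixOf (c :: t) ∧ old ≠ [] then new ++ pvRep1 old new ((c :: t).drop old.length)
    else c :: pvRep1 old new t
  termination_by l => l.length
  decreasing_by
  · simp only [List.length_drop, List.length_cons]
    have : 1 ≤ old.length := List.length_pos_iff.mpr (by tauto)
    omega
  · simp

theorem pvGo_eq (old new : List Char) (hold : old ≠ []) :
    ∀ (fuel : Nat) (l acc : List Char), l.length ≤ fuel →
      PySem.Chars.replace.go old new fuel l acc = acc.reverse ++ pvRep1 old new l := by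
  intro fuel
  induction fuel with
  | zero =>
    intro l acc h
    have : l = [] := List.eq_nil_of_length_eq_zero (Nat.le_zero.mp h)
    subst this
    simp [PySem.Chars.replace.go, pvRep1]
  | succ n ih =>
    intro l acc h
    match l with
    | [] => simp [PySem.Chars.replace.go, pvRep1]
    | c :: t =>
      rw [PySem.Chars.replace.go]
      by_cases hp : old.isPrefixOf (c :: t)
      · have hlen : 1 ≤ old.length := List.length_pos_iff.mpr hold
        have hle : old.length ≤ (c :: t).length := List.IsPrefix.length_le (List.isPrefixOf_iff_prefix.mp hp)
        rw [if_pos hp, ih _ _ (by simp at h ⊢; omega)]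
        rw [pvRep1, if_pos ⟨hp, hold⟩]
        simp
      · rw [if_neg hp, ih _ _ (by simp at h ⊢; omega)]
        rw [pvRep1, if_neg (by tauto)]
        simp

theorem pvReplace_eq (old new l : List Char) (hold : old ≠ []) :
    PySem.Chars.replace l old new = pvRep1 old new l := by
  rw [PySem.Chars.replace, if_neg (by simpa using hold)]
  simpa using pvGo_eq old new hold l.length l [] le_rfl

theorem pvSkip (v : Char) (r : List Char) (c : Char) (t : List Char)
    (h : ¬(c = v ∧ t.head? = some 'H')) :
    pvRep1 [v, 'H'] r (c :: t) = c :: pvRep1 [v, 'H'] r t := by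
  rw [pvRep1, if_neg]
  rintro ⟨hp, -⟩
  apply h
  rcases t with _ | ⟨d, t'⟩
  · simp [List.isPrefixOf] at hp
  · simp [List.isPrefixOf] at hp
    simp [hp.1.symm, hp.2.symm]

theorem pvMatch (v : Char) (r : List Char) (rest : List Char) :
    pvRep1 [v, 'H'] r (v :: 'H' :: rest) = r ++ pvRep1 [v, 'H'] r rest := by
  rw [pvRep1, if_pos]
  · simp
  · simp [List.isPrefixOf]

theorem pvSingle (v : Char) (r : List Char) (c : Char) :
    pvRep1 [v, 'H'] r [c] = [c] := by
  rw [pvSkip v r c [] (by simp), pvRep1]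

theorem pvDist (v : Char) (r : List Char) (A B : List Char)
    (h1 : 'H' ∉ A) (h2 : ¬(A.getLast? = some v ∧ B.head? = some 'H')) :
    pvRep1 [v, 'H'] r (A ++ B) = A ++ pvRep1 [v, 'H'] r B := by
  induction A with
  | nil => simp
  | cons c A' ih =>
    rw [List.cons_append, pvSkip]
    · have h2' : ¬(A'.getLast? = some v ∧ B.head? = some 'H') := by
        rcases A' with _ | ⟨d, A''⟩
        · simp
        · intro hv
          exact h2 (by simpa [List.getLast?_cons_cons] using hv)
      rw [ih (by simp at h1; tauto) h2']
      simp
    · rintro ⟨hc, hh⟩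
      rcases A' with _ | ⟨d, A''⟩
      · exact h2 ⟨by simp [hc], by simpa using hh⟩
      · simp at hh h1
        exact h1.2.1 hh.symm

theorem pvHead (v : Char) (r : List Char) (hr : 'H' ∉ r) (hne : r ≠ [])
    (t : List Char) (ht : t.head? ≠ some 'H') :
    (pvRep1 [v, 'H'] r t).head? ≠ some 'H' := by
  match t with
  | [] => simp [pvRep1]
  | c :: t' =>
    have hc : c ≠ 'H' := by simpa using ht
    by_cases hm : c = v ∧ t'.head? = some 'H'
    · obtain ⟨hcv, hh⟩ := hm
      rcases t' with _ | ⟨d, t''⟩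
      · simp at hh
      · simp at hh
        subst hcv; subst hh
        rw [pvMatch]
        rcases r with _ | ⟨x, r'⟩
        · exact absurd rfl hne
        · simp at hr ⊢
          exact fun h => hr.1 h.symm
    · rw [pvSkip _ _ _ _ hm]
      simpa using hc


theorem pvRepl_eq (v : Char) (r l : List Char) :
    PySem.Chars.replace l (v :: ['H']) r = pvRep1 [v, 'H'] r l :=
  pvReplace_eq _ _ _ (by simp)

theorem pvChain_cons (p : Char × List Char) (tl : List (Char × List Char)) (X : List Char) :
    pvChain (p :: tl) X = pvChain tl (pvRep1 [p.1, 'H'] p.2 X) := by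
  simp only [pvChain, List.foldl_cons, pvRepl_eq]

theorem pvChain_append (l1 l2 : List (Char × List Char)) (X : List Char) :
    pvChain (l1 ++ l2) X = pvChain l2 (pvChain l1 X) := by
  simp [pvChain, List.foldl_append]

theorem pvChain_nil (ps : List (Char × List Char)) : pvChain ps [] = [] := by
  induction ps with
  | nil => rfl
  | cons p tl ih => rw [pvChain_cons, pvRep1]; exact ih

theorem pvChain_single (ps : List (Char × List Char)) (c : Char) :
    pvChain ps [c] = [c] := by
  induction ps with
  | nil => rfl
  | cons p tl ih => rw [pvChain_cons, pvSingle]; exact ih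

theorem pvS1 (ps : List (Char × List Char)) (v : Char) (rest : List Char)
    (h : ∀ p ∈ ps, p.1 ≠ v ∧ p.1 ≠ 'H') :
    pvChain ps (v :: 'H' :: rest) = v :: 'H' :: pvChain ps rest := by
  induction ps generalizing rest with
  | nil => rfl
  | cons p tl ih =>
    have hp := h p (by simp)
    rw [pvChain_cons, pvSkip _ _ _ _ (fun hc => hp.1 hc.1.symm),
        pvSkip _ _ _ _ (fun hc => hp.2 hc.1.symm), ih _ (fun q hq => h q (by simp [hq])),
        pvChain_cons]

theorem pvS2 (ps : List (Char × List Char)) (r Y : List Char)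
    (hr : 'H' ∉ r) (h : ∀ p ∈ ps, r.getLast? ≠ some p.1) :
    pvChain ps (r ++ Y) = r ++ pvChain ps Y := by
  induction ps generalizing Y with
  | nil => rfl
  | cons p tl ih =>
    rw [pvChain_cons, pvDist _ _ _ _ hr (fun hc => h p (by simp) hc.1),
        ih _ (fun q hq => h q (by simp [hq])), pvChain_cons]

theorem pvS3a (ps : List (Char × List Char)) (c : Char) (X : List Char)
    (h : ∀ p ∈ ps, p.1 ≠ c) :
    pvChain ps (c :: X) = c :: pvChain ps X := by
  induction ps generalizing X with
  | nil => rfl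
  | cons p tl ih =>
    rw [pvChain_cons, pvSkip _ _ _ _ (fun hc => h p (by simp) hc.1.symm),
        ih _ (fun q hq => h q (by simp [hq])), pvChain_cons]

theorem pvS3b (ps : List (Char × List Char)) (c : Char) (t : List Char)
    (hps : pvGoodRepl ps) (ht : t.head? ≠ some 'H') :
    pvChain ps (c :: t) = c :: pvChain ps t := by
  induction ps generalizing t with
  | nil => rfl
  | cons p tl ih =>
    have hp := hps p (by simp)
    rw [pvChain_cons, pvSkip _ _ _ _ (fun hc => ht hc.2),
        ih _ (fun q hq => hps q (by simp [hq])) (pvHead _ _ hp.2.2 hp.2.1 _ ht), pvChain_cons]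

theorem pvLookup_split (ps : List (Char × List Char)) (c : Char) (r : List Char)
    (h : ps.lookup c = some r) :
    ∃ l1 l2, ps = l1 ++ (c, r) :: l2 ∧ ∀ p ∈ l1, p.1 ≠ c := by
  induction ps with
  | nil => simp [List.lookup] at h
  | cons p tl ih =>
    by_cases hc : p.1 = c
    · refine ⟨[], tl, ?_, by simp⟩
      have h2 : p.2 = r := by
        simp [List.lookup, hc] at h
        exact h
      rw [← hc, ← h2]
      simp
    · have h' : tl.lookup c = some r := by
        simpa [List.lookup, show (c == p.1) = false by simpa using fun e => hc e.symm] using h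
      obtain ⟨l1, l2, heq, hl1⟩ := ih h'
      exact ⟨p :: l1, l2, by simp [heq], by simpa [hc] using hl1⟩

theorem pvLookup_none (ps : List (Char × List Char)) (c : Char)
    (h : ps.lookup c = none) : ∀ p ∈ ps, p.1 ≠ c := by
  induction ps with
  | nil => simp
  | cons p tl ih =>
    by_cases hc : p.1 = c
    · simp [List.lookup, hc] at h
    · intro q hq
      rcases List.mem_cons.mp hq with h' | h'
      · simpa [h'] using hc
      · refine ih ?_ q h'
        simpa [List.lookup, show (c == p.1) = false by simpa using fun e => hc e.symm] using h

theorem pvChainEq (ps : List (Char × List Char)) (h1 : pvGoodRepl ps) (h2 : pvCross ps) :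
    ∀ l, pvChain ps l = pvRepG ps l := by
  intro l
  induction hn : l.length using Nat.strong_induction_on generalizing l with
  | _ n ih =>
  match l with
  | [] => simpa [pvRepG] using pvChain_nil ps
  | [c] => simpa [pvRepG] using pvChain_single ps c
  | c :: d :: rest =>
    by_cases hd : d = 'H'
    · subst hd
      cases hlk : ps.lookup c with
      | none =>
        have hne : ∀ p ∈ ps, p.1 ≠ c := pvLookup_none ps c hlk
        rw [pvS3a ps c ('H' :: rest) hne,
            ih ('H' :: rest).length (by simp [← hn]) ('H' :: rest) rfl,
            pvRepG]
        simp [hlk]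
      | some r =>
        obtain ⟨l1, l2, heq, hl1⟩ := pvLookup_split ps c r hlk
        have hgood1 : ∀ p ∈ l1, p.1 ≠ c ∧ p.1 ≠ 'H' := by
          intro p hp
          exact ⟨hl1 p hp, (h1 p (by simp [heq, hp])).1⟩
        have hcr : (c, r) ∈ ps := by simp [heq]
        have hrH : 'H' ∉ r := (h1 _ hcr).2.2
        have hl2 : ∀ p ∈ l2, r.getLast? ≠ some p.1 := by
          have := (List.pairwise_append.mp (heq ▸ h2)).2.1
          intro p hp
          exact ((List.pairwise_cons.mp this).1 p hp).2
        calc pvChain ps (c :: 'H' :: rest)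
            = pvChain ((c, r) :: l2) (pvChain l1 (c :: 'H' :: rest)) := by
              rw [heq, pvChain_append]
          _ = pvChain ((c, r) :: l2) (c :: 'H' :: pvChain l1 rest) := by
              rw [pvS1 _ _ _ hgood1]
          _ = pvChain l2 (r ++ pvChain (l1 ++ [(c, r)]) rest) := by
              rw [pvChain_cons, pvMatch]
              rw [show pvRep1 [c, 'H'] r (pvChain l1 rest) = pvChain (l1 ++ [(c,r)]) rest by
                    rw [pvChain_append, pvChain_cons]
                    rfl]
          _ = r ++ pvChain ps rest := by
              rw [pvS2 _ _ _ hrH hl2, ← pvChain_append, heq]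
              simp
          _ = r ++ pvRepG ps rest := by
              rw [ih rest.length (by simp [← hn]) rest rfl]
        rw [pvRepG]
        simp [hlk]
    · rw [pvS3b ps c (d :: rest) h1 (by simpa using hd)]
      rw [ih (d :: rest).length (by simp [← hn]) (d :: rest) rfl]
      rw [pvRepG, if_neg hd]

theorem pvStepB_push (out : List (List Char)) (prev : Option Char) (c : Char)
    (h : c = 'H' → ∀ p, prev = some p → pvTable.lookup p = none) :
    pvStepB (out, prev) c = (out ++ [[c]], some c) := by
  cases prev with
  | none => rfl
  | some p =>
    cases hlk : pvTable.lookup p with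
    | none => simp [pvStepB, hlk]
    | some r =>
      have hc : c ≠ 'H' := fun hcH => by simpa [hlk] using h hcH p rfl
      simp [pvStepB, hlk, hc]

theorem pvFoldB :
    ∀ (n : Nat) (l : List Char) (out : List (List Char)) (prev : Option Char),
      l.length = n →
      (l.head? = some 'H' → ∀ p, prev = some p → pvTable.lookup p = none) →
      ((l.foldl pvStepB (out, prev)).1).flatten = out.flatten ++ pvRepG pvTable l := by
  intro n
  induction n using Nat.strong_induction_on with
  | _ n ih =>
  intro l out prev hn hp
  match l with
  | [] => simp [pvRepG]
  | c :: rest =>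
    rw [List.foldl_cons,
        pvStepB_push out prev c (fun hc => hp (by simp [hc]))]
    cases hr : rest with
    | nil =>
      simp [pvRepG]
    | cons d rest' =>
      by_cases hm : d = 'H' ∧ (pvTable.lookup c).isSome
      · obtain ⟨hd, hlk⟩ := hm
        obtain ⟨r, hr'⟩ := Option.isSome_iff_exists.mp hlk
        subst hd
        rw [List.foldl_cons]
        have hstep : pvStepB (out ++ [[c]], some c) 'H' = (out ++ [r], some 'H') := by
          simp [pvStepB, hr']
        rw [hstep,
            ih rest'.length (by simp [← hn, hr]) rest' (out ++ [r]) (some 'H') rfl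
              (fun _ p hpp => by cases hpp; rfl)]
        rw [pvRepG]
        simp [hr']
      · have hrec := ih (d :: rest').length (by simp [← hn, hr]) (d :: rest')
          (out ++ [[c]]) (some c) rfl
          (fun hh p hpp => by
            cases hpp
            rcases not_and_or.mp hm with h' | h'
            · exact absurd (by simpa using hh) h'
            · exact Option.not_isSome_iff_eq_none.mp h')
        rw [hrec, pvRepG]
        have : ¬(d = 'H' ∧ (pvTable.lookup c).isSome) := hm
        by_cases hd : d = 'H'
        · have : pvTable.lookup c = none := by
            rcases not_and_or.mp hm with h' | h'
            · exact absurd hd h'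
            · exact Option.not_isSome_iff_eq_none.mp h'
          simp [hd, this]
        · simp [hd]


theorem pvA_toList (text : String) :
    (adapt_visargas text).toList = pvChain pvTable text.toList := by
  simp only [adapt_visargas, pvChain, pvTable, List.foldl_cons, List.foldl_nil,
    PySem.Str.toList_replace]
  simp

theorem pvB_eq (text : String) :
    adapt_visargas_alt text = String.ofList (pvRepG pvTable text.toList) := by
  rw [adapt_visargas_alt,
      pvFoldB text.toList.length text.toList [] none rfl (by simp)]
  simp

-- ===== VERDICT (by name: the statement is the Claim_ definition above) =====
theorem adapt_visargas_spec : Claim_equal_adapt_visargas := by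
  intro text _
  show adapt_visargas text = adapt_visargas_alt text
  rw [pvB_eq, ← pvChainEq pvTable (by unfold pvGoodRepl pvTable; decide) (by unfold pvCross pvTable; decide),
      ← pvA_toList, String.ofList_toList]
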